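-- pv_equiv track=rewrite | github.com/Gohankaiju/AtCoder_Archive | ABC/exa/2.py | getSubstringCount
-- ===== SOURCE A (Python) =====
-- def getSubstringCount(s):
--     count = 0
--     prev_len, now_len = 0, 1
--
--     for i in range(1, len(s)):
--         if s[i] == s[i - 1]:
--             now_len += 1
--         else:
--             count += min(prev_len, now_len)
--             prev_len = now_len
--             now_len = 1
--
--     count += min(prev_len, now_len)
--     return count
-- ===== SOURCE B (Python) =====
-- def getSubstringCount(s):
--     # B: two-phase decomposition - materialize the run-length list of s,
--     # then sum min over adjacent runs in a separate pass.
--     runs = []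
--     prev, cnt = None, 0
--     for ch in s:
--         if ch == prev:
--             cnt += 1
--         else:
--             if cnt:
--                 runs.append(cnt)
--             prev, cnt = ch, 1
--     if cnt:
--         runs.append(cnt)
--     return sum(min(a, b) for a, b in zip(runs, runs[1:]))
-- ===== Notes on version B (the rewrite author's own statement) =====
-- stated objective: simpler
-- what changed: Replaces A's single interleaved index scan maintaining two run-length scalars with a two-phase approach: build the run-length list of the string, then sum min over adjacent run pairs.
import Mathlib
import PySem

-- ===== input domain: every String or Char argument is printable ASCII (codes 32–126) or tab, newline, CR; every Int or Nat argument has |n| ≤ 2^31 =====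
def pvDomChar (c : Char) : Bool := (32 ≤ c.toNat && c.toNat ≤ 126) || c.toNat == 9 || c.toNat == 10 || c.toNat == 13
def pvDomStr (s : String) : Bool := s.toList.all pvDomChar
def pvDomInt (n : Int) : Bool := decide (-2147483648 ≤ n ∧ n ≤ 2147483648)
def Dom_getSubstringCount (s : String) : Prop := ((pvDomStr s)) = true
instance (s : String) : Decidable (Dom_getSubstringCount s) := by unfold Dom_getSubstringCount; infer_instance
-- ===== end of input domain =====

-- B replaces A's single interleaved index scan (two run-length scalars) with a two-phase
-- decomposition: materialize the run-length list, then sum min over adjacent runs (objective: simpler).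

-- ===== PORT A =====
def getSubstringCount (s : String) : Int :=
  let cs := s.toList
  let st := (PySem.List.pyRange 1 (PySem.List.len cs) 1).foldl
    (fun (st : Int × Int × Int) i =>
      if PySem.List.pyGet? cs i = PySem.List.pyGet? cs (i - 1) then
        (st.1, st.2.1, st.2.2 + 1)
      else
        (st.1 + min st.2.1 st.2.2, st.2.2, 1))
    (0, 0, 1)
  st.1 + min st.2.1 st.2.2

-- ===== PORT B =====
def getSubstringCount_alt (s : String) : Int :=
  let st := s.toList.foldl
    (fun (st : List Int × Option Char × Int) ch =>
      if some ch = st.2.1 then (st.1, st.2.1, st.2.2 + 1)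
      else ((if st.2.2 ≠ 0 then st.1 ++ [st.2.2] else st.1), some ch, 1))
    ([], none, 0)
  let runs := if st.2.2 ≠ 0 then st.1 ++ [st.2.2] else st.1
  ((runs.zip runs.tail).map (fun p => min p.1 p.2)).sum

-- ===== PRECONDITION & SPEC =====
def Spec_getSubstringCount (s : String) (out : Int) : Prop := out = getSubstringCount_alt s
instance (s : String) (out : Int) : Decidable (Spec_getSubstringCount s out) := by unfold Spec_getSubstringCount; infer_instance

-- ===== CLAIM (what is proved, stated in full; the proofs are below) =====
def Claim_equal_getSubstringCount : Prop := ∀ (s : String), Dom_getSubstringCount s → Spec_getSubstringCount s (getSubstringCount s)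

-- ===== LEMMAS AND PROOFS =====

-- A's loop step and final expression, named (definitionally A's inline code)
def pvStepA (cs : List Char) (st : Int × Int × Int) (i : Int) : Int × Int × Int :=
  if PySem.List.pyGet? cs i = PySem.List.pyGet? cs (i - 1) then
    (st.1, st.2.1, st.2.2 + 1)
  else
    (st.1 + min st.2.1 st.2.2, st.2.2, 1)

def pvFinishA (st : Int × Int × Int) : Int := st.1 + min st.2.1 st.2.2

-- B's loop step and run-list finalization, named (definitionally B's inline code)
def pvStepB (st : List Int × Option Char × Int) (ch : Char) : List Int × Option Char × Int :=
  if some ch = st.2.1 then (st.1, st.2.1, st.2.2 + 1)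
  else ((if st.2.2 ≠ 0 then st.1 ++ [st.2.2] else st.1), some ch, 1)

def pvFinishB (st : List Int × Option Char × Int) : List Int :=
  if st.2.2 ≠ 0 then st.1 ++ [st.2.2] else st.1

-- reference run-length list: current run has char c and length w so far, rest still to scan
def pvGo (c : Char) (w : Int) : List Char → List Int
  | [] => [w]
  | d :: t => if d = c then pvGo c (w + 1) t else w :: pvGo d 1 t

-- reference sum of min over adjacent pairs
def pvPairSum : List Int → Int
  | [] => 0
  | [_] => 0
  | x :: y :: t => min x y + pvPairSum (y :: t)

theorem pvGo_pos : ∀ (rest : List Char) (c : Char) (w : Int), 0 < w →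
    ∀ x ∈ pvGo c w rest, 0 < x := by
  intro rest
  induction rest with
  | nil => intro c w hw x hx; simp [pvGo] at hx; omega
  | cons d t ih =>
      intro c w hw x hx
      simp only [pvGo] at hx
      by_cases hdc : d = c
      · simp [hdc] at hx
        exact ih c (w + 1) (by omega) x hx
      · simp [hdc] at hx
        rcases hx with h | h
        · omega
        · exact ih d 1 (by omega) x h

theorem pvPairSum_cons_zero (l : List Int) (hl : ∀ x ∈ l, 0 < x) :
    pvPairSum (0 :: l) = pvPairSum l := by
  cases l with
  | nil => simp [pvPairSum]
  | cons x t =>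
      have hx : 0 < x := hl x (by simp)
      simp [pvPairSum, min_eq_left (by omega : (0:Int) ≤ x)]

theorem pvZipSum_eq_pairSum : ∀ (l : List Int),
    ((l.zip l.tail).map (fun p => min p.1 p.2)).sum = pvPairSum l := by
  intro l
  induction l with
  | nil => simp [pvPairSum]
  | cons x t ih =>
      cases t with
      | nil => simp [pvPairSum]
      | cons y t' =>
          simp only [List.tail_cons] at ih
          simp [pvPairSum, ih]

theorem pvB_bridge (rest : List Char) : ∀ (acc : List Int) (c : Char) (n : Int), 1 ≤ n →
    pvFinishB (rest.foldl pvStepB (acc, some c, n)) = acc ++ pvGo c n rest := by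
  induction rest with
  | nil =>
      intro acc c n hn
      simp [pvFinishB, pvGo, show n ≠ 0 from by omega]
  | cons d t ih =>
      intro acc c n hn
      rw [List.foldl_cons]
      by_cases hdc : d = c
      · subst hdc
        have hstep : pvStepB (acc, some d, n) d = (acc, some d, n + 1) := by
          simp [pvStepB]
        rw [hstep, ih acc d (n + 1) (by omega)]
        simp [pvGo]
      · have hstep : pvStepB (acc, some c, n) d = (acc ++ [n], some d, 1) := by
          simp [pvStepB, hdc, show n ≠ 0 from by omega]
        rw [hstep, ih (acc ++ [n]) d 1 (by omega)]
        simp [pvGo, hdc]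

theorem pvA_bridge (rest : List Char) : ∀ (pre : List Char) (c : Char) (cnt p w : Int),
    pvFinishA ((PySem.List.pyRange ((pre.length : Int) + 1) ((pre.length : Int) + 1 + (rest.length : Int)) 1).foldl
      (pvStepA (pre ++ c :: rest)) (cnt, p, w)) = cnt + pvPairSum (p :: pvGo c w rest) := by
  induction rest with
  | nil =>
      intro pre c cnt p w
      rw [PySem.List.pyRange_one_eq_nil (by simp)]
      simp [pvFinishA, pvGo, pvPairSum]
  | cons d t ih =>
      intro pre c cnt p w
      have h2 : PySem.List.pyGet? (pre ++ c :: d :: t) ((pre.length : Int)) = some c :=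
        PySem.List.pyGet?_append_length pre (d :: t) c
      have h1 : PySem.List.pyGet? (pre ++ c :: d :: t) ((pre.length : Int) + 1) = some d := by
        have h := PySem.List.pyGet?_append_length (pre ++ [c]) t d
        simpa using h
      have hstep : pvStepA (pre ++ c :: d :: t) (cnt, p, w) ((pre.length : Int) + 1)
          = if d = c then (cnt, p, w + 1) else (cnt + min p w, w, 1) := by
        simp only [pvStepA, show ((pre.length : Int) + 1 - 1) = ((pre.length : Int)) from by ring, h1, h2]
        by_cases hdc : d = c <;> simp [hdc]
      rw [PySem.List.pyRange_one_cons (by push_cast [List.length_cons]; omega), List.foldl_cons, hstep]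
      rw [show ((pre.length : Int) + 1 + (((d :: t)).length : Int)) = ((pre.length : Int) + 1 + 1 + ((t).length : Int)) from by push_cast [List.length_cons]; ring]
      by_cases hdc : d = c
      · subst hdc
        rw [if_pos rfl]
        rw [show pre ++ d :: d :: t = (pre ++ [d]) ++ d :: t from by simp]
        have ih' := ih (pre ++ [d]) d cnt p (w + 1)
        simp only [List.length_append, List.length_cons, List.length_nil] at ih'
        push_cast at ih'
        rw [ih']
        simp [pvGo]
      · rw [if_neg hdc]
        rw [show pre ++ c :: d :: t = (pre ++ [c]) ++ d :: t from by simp]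
        have ih' := ih (pre ++ [c]) d (cnt + min p w) w 1
        simp only [List.length_append, List.length_cons, List.length_nil] at ih'
        push_cast at ih'
        rw [ih']
        simp only [pvGo, if_neg hdc, pvPairSum]
        omega

-- ===== VERDICT (by name: the statement is the Claim_ definition above) =====
theorem getSubstringCount_spec : Claim_equal_getSubstringCount := by
  intro s _
  show getSubstringCount s = getSubstringCount_alt s
  simp only [getSubstringCount, getSubstringCount_alt]
  have hA : ∀ cs : List Char, (fun (st : Int × Int × Int) i =>
      if PySem.List.pyGet? cs i = PySem.List.pyGet? cs (i - 1) then (st.1, st.2.1, st.2.2 + 1)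
      else (st.1 + min st.2.1 st.2.2, st.2.2, 1)) = pvStepA cs := fun _ => rfl
  have hB : (fun (st : List Int × Option Char × Int) ch =>
      if some ch = st.2.1 then (st.1, st.2.1, st.2.2 + 1)
      else ((if st.2.2 ≠ 0 then st.1 ++ [st.2.2] else st.1), some ch, 1)) = pvStepB := rfl
  have hfinA : ∀ st : Int × Int × Int, st.1 + min st.2.1 st.2.2 = pvFinishA st := fun _ => rfl
  have hfinB : ∀ st : List Int × Option Char × Int,
      (if st.2.2 ≠ 0 then st.1 ++ [st.2.2] else st.1) = pvFinishB st := fun _ => rfl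
  rw [hA, hB, PySem.List.len_eq, hfinA, hfinB]
  cases hcs : s.toList with
  | nil =>
      rw [PySem.List.pyRange_one_eq_nil (by simp)]
      simp [pvFinishA, pvFinishB]
      try omega
  | cons c rest =>
      have hstep0 : pvStepB ([], none, 0) c = ([], some c, 1) := by simp [pvStepB]
      rw [List.foldl_cons, hstep0]
      rw [pvB_bridge rest [] c 1 (by norm_num)]
      rw [show (((c :: rest).length : Nat) : Int) = 1 + (rest.length : Int) from by push_cast [List.length_cons]; ring]
      have hAA := pvA_bridge rest [] c 0 0 1
      simp only [List.length_nil, List.nil_append, Nat.cast_zero, zero_add] at hAA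
      rw [hAA]
      rw [pvPairSum_cons_zero _ (pvGo_pos rest c 1 (by norm_num)), ← pvZipSum_eq_pairSum]
      simp
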